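-- pv_equiv track=rewrite | github.com/Cirromulus/HK-OneWire-Analyzer | HLA/HK F500 Commands/HighLevelAnalyzer.py | decodeTimeData
-- ===== SOURCE A (Python) =====
-- def decodeTimeData(isForward, data):
--     result = " " if isForward else "-"
--     nibbles = []
--     for byte in data:
--         nibbles.append((byte & 0xF0) >> 4)
--         nibbles.append(byte & 0xF)
--     result += f"{nibbles[0]}{nibbles[1]}:{nibbles[2]}{nibbles[3]}"
--     return result
-- ===== SOURCE B (Python) =====
-- def decodeTimeData(isForward, data):
--     # Pack the two bytes into one 16-bit word, then peel BCD digits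
--     # least-significant-first with divmod, assembling the string back-to-front.
--     n = (data[0] & 0xFF) * 256 + (data[1] & 0xFF)
--     digits = []
--     for _ in range(4):
--         n, r = divmod(n, 16)
--         digits.append(str(r))
--     return (" " if isForward else "-") + digits[3] + digits[2] + ":" + digits[1] + digits[0]
-- ===== Notes on version B (the rewrite author's own statement) =====
-- stated objective: alternative
-- what changed: B packs the first two bytes into a single 16-bit integer and peels the four digits least-significant-first with a divmod loop, assembling the string back-to-front, instead of building a nibble list over the whole input with per-byte mask-and-shift; B also never traverses bytes beyond the second.
import Mathlib
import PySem

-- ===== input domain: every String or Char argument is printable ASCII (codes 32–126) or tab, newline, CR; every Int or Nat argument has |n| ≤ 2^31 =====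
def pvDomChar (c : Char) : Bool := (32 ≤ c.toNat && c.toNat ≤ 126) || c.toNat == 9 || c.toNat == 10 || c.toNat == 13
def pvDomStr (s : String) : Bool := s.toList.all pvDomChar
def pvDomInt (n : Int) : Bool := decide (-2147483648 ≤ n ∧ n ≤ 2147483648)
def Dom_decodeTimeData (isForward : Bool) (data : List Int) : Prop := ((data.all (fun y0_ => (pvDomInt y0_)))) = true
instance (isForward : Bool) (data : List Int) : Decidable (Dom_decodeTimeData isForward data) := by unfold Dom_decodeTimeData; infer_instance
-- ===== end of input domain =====

-- B packs the first two bytes into one 16-bit word and peels the four digits with a divmod loop,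
-- building the string back-to-front, instead of A's nibble list over the whole input (objective: alternative).

-- ===== PORT A =====
-- A builds a nibble list over ALL of data with per-byte mask-and-shift, then formats nibbles[0..3].
def decodeTimeData (isForward : Bool) (data : List Int) : String :=
  let result : String := if isForward then " " else "-"
  let nibbles : List Int :=
    data.foldl (fun ns byte => ns ++ [(PySem.Int.band byte 0xF0) >>> 4, PySem.Int.band byte 0xF]) []
  -- nibbles[0..3]: Python raises IndexError when missing; Pre_ excludes that, default 0 is never used there
  result ++ (PySem.Int.toStr ((PySem.List.pyGet? nibbles 0).getD 0)
         ++ PySem.Int.toStr ((PySem.List.pyGet? nibbles 1).getD 0)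
         ++ ":"
         ++ PySem.Int.toStr ((PySem.List.pyGet? nibbles 2).getD 0)
         ++ PySem.Int.toStr ((PySem.List.pyGet? nibbles 3).getD 0))

-- ===== PORT B =====
def decodeTimeData_alt (isForward : Bool) (data : List Int) : String :=
  -- data[0], data[1]: Python raises IndexError when missing; Pre_ excludes that
  let n0 : Int := (PySem.Int.band ((PySem.List.pyGet? data 0).getD 0) 0xFF) * 256
                + PySem.Int.band ((PySem.List.pyGet? data 1).getD 0) 0xFF
  -- for _ in range(4): n, r = divmod(n, 16); digits.append(str(r))
  let st : Int × List String :=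
    (List.range 4).foldl
      (fun p _ =>
        let dm := (PySem.Int.divmod? p.1 16).getD (0, 0)  -- divisor 16 ≠ 0: never none
        (dm.1, p.2 ++ [PySem.Int.toStr dm.2]))
      (n0, [])
  let digits := st.2
  let g : Int → String := fun i => (PySem.List.pyGet? digits i).getD ""
  (if isForward then " " else "-") ++ g 3 ++ g 2 ++ ":" ++ g 1 ++ g 0

-- ===== PRECONDITION & SPEC =====
-- A (and B) raise IndexError when data has fewer than two bytes.
def Pre_decodeTimeData (isForward : Bool) (data : List Int) : Prop := 2 ≤ data.length
instance (isForward : Bool) (data : List Int) : Decidable (Pre_decodeTimeData isForward data) := by unfold Pre_decodeTimeData; infer_instance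

def pvWitness_decodeTimeData : Bool × List Int := (true, [18, 52])

def Spec_decodeTimeData (isForward : Bool) (data : List Int) (out : String) : Prop := out = decodeTimeData_alt isForward data
instance (isForward : Bool) (data : List Int) (out : String) : Decidable (Spec_decodeTimeData isForward data out) := by unfold Spec_decodeTimeData; infer_instance

-- ===== CLAIM (what is proved, stated in full; the proofs are below) =====
def Claim_equal_decodeTimeData : Prop := ∀ (isForward : Bool) (data : List Int), Dom_decodeTimeData isForward data → Pre_decodeTimeData isForward data → Spec_decodeTimeData isForward data (decodeTimeData isForward data)

-- ===== LEMMAS AND PROOFS =====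

-- Python's b & 0xFF is b mod 256 (both branches of PySem.Int.band).
theorem pvBand255 (b : Int) : PySem.Int.band b 255 = b % 256 := by
  by_cases hb : 0 ≤ b
  · rw [PySem.Int.band_of_nonneg hb (by norm_num)]
    have h := Nat.and_two_pow_sub_one_eq_mod b.toNat 8
    norm_num at h
    simp only [show ((255 : Int).toNat) = 255 from rfl]
    omega
  · unfold PySem.Int.band
    rw [if_neg (by omega), if_pos (by norm_num)]
    have h := Nat.and_two_pow_sub_one_eq_mod (-b - 1).toNat 8
    norm_num at h
    simp only [show ((255 : Int).toNat) = 255 from rfl, Nat.and_comm]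
    rw [show (-b - 1).toNat = (-b).toNat - 1 from by omega]
    omega

-- Python's b & 0xF is b mod 16.
theorem pvBand15 (b : Int) : PySem.Int.band b 15 = b % 16 := by
  by_cases hb : 0 ≤ b
  · rw [PySem.Int.band_of_nonneg hb (by norm_num)]
    have h := Nat.and_two_pow_sub_one_eq_mod b.toNat 4
    norm_num at h
    simp only [show ((15 : Int).toNat) = 15 from rfl]
    omega
  · unfold PySem.Int.band
    rw [if_neg (by omega), if_pos (by norm_num)]
    have h := Nat.and_two_pow_sub_one_eq_mod (-b - 1).toNat 4
    norm_num at h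
    simp only [show ((15 : Int).toNat) = 15 from rfl, Nat.and_comm]
    rw [show (-b - 1).toNat = (-b).toNat - 1 from by omega]
    omega

-- Nat: masking the high nibble of a byte.
theorem pvNatAnd240 (n : Nat) : n &&& 240 = 16 * ((n / 16) % 16) := by
  have h1 := @Nat.and_div_two_pow n 240 4
  norm_num at h1
  have h2 : (n &&& 240) % 16 = 0 := by
    have := Nat.and_two_pow_sub_one_eq_mod (n &&& 240) 4
    norm_num at this
    rw [Nat.and_assoc, show (240 &&& 15 : Nat) = 0 from rfl, Nat.and_zero] at this
    omega
  have h3 := Nat.and_two_pow_sub_one_eq_mod (n / 16) 4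
  norm_num at h3
  omega

-- casting a Nat through Python's >> 4
theorem pvCastShift4 (k : Nat) : ((k : Int)) >>> (4 : Int) = ((k >>> 4 : Nat) : Int) := rfl

-- Python's (b & 0xF0) >> 4 is (b mod 256) / 16.
theorem pvBand240Shift (b : Int) : (PySem.Int.band b 240) >>> 4 = b % 256 / 16 := by
  by_cases hb : 0 ≤ b
  · rw [PySem.Int.band_of_nonneg hb (by norm_num)]
    simp only [show ((240 : Int).toNat) = 240 from rfl]
    rw [pvNatAnd240, pvCastShift4, Nat.shiftRight_eq_div_pow,
        show ((2 : Nat) ^ 4) = 16 from rfl]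
    omega
  · unfold PySem.Int.band
    rw [if_neg (by omega), if_pos (by norm_num)]
    simp only [show ((240 : Int).toNat) = 240 from rfl]
    rw [Nat.and_comm, pvNatAnd240, pvCastShift4, Nat.shiftRight_eq_div_pow,
        show ((2 : Nat) ^ 4) = 16 from rfl,
        show (-b - 1).toNat = (-b).toNat - 1 from by omega]
    omega

-- A's loop only ever appends, so the whole nibble list is a flatMap.
theorem pvNibblesFoldl (data : List Int) (acc : List Int) :
    data.foldl (fun ns byte => ns ++ [(PySem.Int.band byte 0xF0) >>> 4, PySem.Int.band byte 0xF]) acc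
      = acc ++ data.flatMap (fun byte => [(PySem.Int.band byte 0xF0) >>> 4, PySem.Int.band byte 0xF]) := by
  induction data generalizing acc with
  | nil => simp
  | cons b rest ih => simp [List.foldl_cons, ih, List.append_assoc]

-- indexing cons-shaped lists at the literal indices used by the two ports
theorem pvGetD1 {α : Type} [Inhabited α] (a b : α) (l : List α) (d : α) :
    (PySem.List.pyGet? (a::b::l) 1).getD d = b := by
  simp [PySem.List.pyGet?, PySem.List.pyIdx?]
theorem pvGetD2 {α : Type} [Inhabited α] (a b c : α) (l : List α) (d : α) :
    (PySem.List.pyGet? (a::b::c::l) 2).getD d = c := by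
  simp [PySem.List.pyGet?, PySem.List.pyIdx?]
  rw [if_pos (by omega)]; simp
theorem pvGetD3 {α : Type} [Inhabited α] (a b c e : α) (l : List α) (d : α) :
    (PySem.List.pyGet? (a::b::c::e::l) 3).getD d = e := by
  simp [PySem.List.pyGet?, PySem.List.pyIdx?]
  rw [if_pos (by omega)]; simp

-- ===== VERDICT (by name: the statement is the Claim_ definition above) =====
theorem decodeTimeData_spec : Claim_equal_decodeTimeData := by
  intro isForward data _ hpre
  unfold Pre_decodeTimeData at hpre
  match data, hpre with
  | b0 :: b1 :: rest, _ =>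
    unfold Spec_decodeTimeData decodeTimeData decodeTimeData_alt
    rw [pvNibblesFoldl]
    simp only [List.flatMap_cons, List.cons_append, List.nil_append,
      show List.range 4 = [0, 1, 2, 3] from rfl, List.foldl_cons, List.foldl_nil]
    simp only [PySem.Int.divmod?, if_neg (show (16 : Int) ≠ 0 by norm_num), Option.getD_some]
    simp only [Int.fdiv_eq_ediv, Int.fmod_eq_emod]
    norm_num
    rw [pvGetD1, pvGetD2, pvGetD3]
    simp only [show ((3 : Int).toNat) = 3 from rfl, show ((2 : Int).toNat) = 2 from rfl,
      List.getElem_cons_succ, List.getElem_cons_zero]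
    simp only [pvBand255, pvBand240Shift, pvBand15]
    have e0 : (b0 % 256 * 256 + b1 % 256) % 16 = b1 % 16 := by omega
    have e1 : (b0 % 256 * 256 + b1 % 256) / 16 % 16 = b1 % 256 / 16 := by omega
    have e2 : (b0 % 256 * 256 + b1 % 256) / 16 / 16 % 16 = b0 % 16 := by omega
    have e3 : (b0 % 256 * 256 + b1 % 256) / 16 / 16 / 16 % 16 = b0 % 256 / 16 := by omega
    rw [e0, e1, e2, e3]
    simp [String.append_assoc]
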